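-- pv_equiv track=rewrite | github.com/ywkuo/Helth-monitoring-and-management-system | auto-thermometer/submit.py | if_exist
-- ===== SOURCE A (Python) =====
-- def if_exist(img,x1,y1,x2,y2):
--     count = 0
--     for i in range(x2-x1):
--         for j in range(y2-y1):
--             if (img[y1+j][x1+i]==0):
--                 count = count+1
--                 img[y1+j][x1+i]= 128
--             else:
--                 img[y1+j][x1+i] = 200
-- #                if count > 10:
-- #                    break
--     if count>6:
--         return True
--     else:
--         return False
-- ===== SOURCE B (Python) =====
-- def if_exist(img, x1, y1, x2, y2):
--     count = sum(1 for i in range(x2 - x1) for j in range(y2 - y1)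
--                 if img[y1 + j][x1 + i] == 0)
--     for i in range(x2 - x1):
--         for j in range(y2 - y1):
--             img[y1 + j][x1 + i] = 128 if img[y1 + j][x1 + i] == 0 else 200
--     return count > 6
-- ===== Notes on version B (the rewrite author's own statement) =====
-- stated objective: simpler
-- what changed: B splits A's single mutating count-while-recolouring loop into a non-mutating counting pass (a sum over the rectangle of the original image) followed by a separate recolouring pass, returning count > 6 directly.
-- outside the precondition, e.g. on if_exist([[0, 0, 0, 0, 0, 0]], 0, -1, 6, 1): A returns False, B returns True
import Mathlib
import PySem

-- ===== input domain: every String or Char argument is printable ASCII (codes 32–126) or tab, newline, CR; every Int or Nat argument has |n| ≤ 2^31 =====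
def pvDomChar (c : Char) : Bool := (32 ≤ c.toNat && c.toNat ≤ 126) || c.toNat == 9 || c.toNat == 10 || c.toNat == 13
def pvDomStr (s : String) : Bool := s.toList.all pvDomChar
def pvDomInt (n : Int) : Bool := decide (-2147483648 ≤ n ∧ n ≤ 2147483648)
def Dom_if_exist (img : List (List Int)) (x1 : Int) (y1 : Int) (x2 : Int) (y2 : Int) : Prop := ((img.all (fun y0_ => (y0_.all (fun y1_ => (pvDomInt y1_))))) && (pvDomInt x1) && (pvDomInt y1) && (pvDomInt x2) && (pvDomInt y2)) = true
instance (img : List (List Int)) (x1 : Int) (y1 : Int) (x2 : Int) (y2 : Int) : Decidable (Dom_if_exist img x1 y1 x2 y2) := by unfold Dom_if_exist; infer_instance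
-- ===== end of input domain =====

-- B computes the zero count in a separate non-mutating pass and recolours in a second pass
-- (objective: simpler decomposition); A and B recolour img in place identically, and the
-- equivalence proved here is about the RETURN value.

-- shared access helpers: img[r][c] as an r-value / img[r][c] = v
-- (exact for in-range indices, which Pre_if_exist guarantees)
def pvRead (M : List (List Int)) (r c : Int) : Int :=
  PySem.List.pyGetD (PySem.List.pyGetD M r []) c 0

def pvWrite (M : List (List Int)) (r c : Int) (v : Int) : List (List Int) :=
  PySem.List.pySetD M r (PySem.List.pySetD (PySem.List.pyGetD M r []) c v)

-- ===== PORT A =====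
def if_exist (img : List (List Int)) (x1 : Int) (y1 : Int) (x2 : Int) (y2 : Int) : Bool :=
  let s :=
    (PySem.List.pyRange 0 (x2 - x1) 1).foldl
      (fun s i =>
        (PySem.List.pyRange 0 (y2 - y1) 1).foldl
          (fun (s : List (List Int) × Int) j =>
            if pvRead s.1 (y1 + j) (x1 + i) == 0 then
              (pvWrite s.1 (y1 + j) (x1 + i) 128, s.2 + 1)
            else
              (pvWrite s.1 (y1 + j) (x1 + i) 200, s.2)) s)
      (img, (0 : Int))
  if s.2 > 6 then true else false

-- ===== PORT B =====
def if_exist_alt (img : List (List Int)) (x1 : Int) (y1 : Int) (x2 : Int) (y2 : Int) : Bool :=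
  let count :=
    (PySem.List.pyRange 0 (x2 - x1) 1).foldl
      (fun c i =>
        (PySem.List.pyRange 0 (y2 - y1) 1).foldl
          (fun (c : Int) j => if pvRead img (y1 + j) (x1 + i) == 0 then c + 1 else c) c)
      (0 : Int)
  -- the recolouring pass of Source B (a side effect on img in Python; its value is unused here)
  let _img2 :=
    (PySem.List.pyRange 0 (x2 - x1) 1).foldl
      (fun M i =>
        (PySem.List.pyRange 0 (y2 - y1) 1).foldl
          (fun (M : List (List Int)) j =>
            pvWrite M (y1 + j) (x1 + i)
              (if pvRead M (y1 + j) (x1 + i) == 0 then 128 else 200)) M) img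
  decide (count > 6)

-- ===== PRECONDITION & SPEC =====
-- Pre_ excludes (a) inputs where A raises IndexError (a pixel of the rectangle outside the image)
-- and (b) non-empty rectangles with a negative start coordinate, where Python's negative-index
-- wraparound can make the loops visit one pixel twice, so that A's in-place recolouring during
-- counting makes the count depend on visit order — an accidental corner no caller would specify.
def Pre_if_exist (img : List (List Int)) (x1 : Int) (y1 : Int) (x2 : Int) (y2 : Int) : Prop :=
  x1 < x2 ∧ y1 < y2 →
    0 ≤ x1 ∧ 0 ≤ y1 ∧ y2 ≤ (img.length : Int) ∧
      ∀ j < (y2 - y1).toNat, x2 ≤ ((img.getD (y1.toNat + j) []).length : Int)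
instance (img : List (List Int)) (x1 : Int) (y1 : Int) (x2 : Int) (y2 : Int) : Decidable (Pre_if_exist img x1 y1 x2 y2) := by unfold Pre_if_exist; infer_instance

def pvWitness_if_exist : List (List Int) × Int × Int × Int × Int :=
  ([[0, 0, 0], [0, 0, 5], [0, 0, 0]], 0, 0, 3, 3)

def Spec_if_exist (img : List (List Int)) (x1 : Int) (y1 : Int) (x2 : Int) (y2 : Int) (out : Bool) : Prop := out = if_exist_alt img x1 y1 x2 y2
instance (img : List (List Int)) (x1 : Int) (y1 : Int) (x2 : Int) (y2 : Int) (out : Bool) : Decidable (Spec_if_exist img x1 y1 x2 y2 out) := by unfold Spec_if_exist; infer_instance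

-- ===== CLAIM (what is proved, stated in full; the proofs are below) =====
def Claim_equal_if_exist : Prop := ∀ (img : List (List Int)) (x1 : Int) (y1 : Int) (x2 : Int) (y2 : Int), Dom_if_exist img x1 y1 x2 y2 → Pre_if_exist img x1 y1 x2 y2 → Spec_if_exist img x1 y1 x2 y2 (if_exist img x1 y1 x2 y2)

-- ===== LEMMAS AND PROOFS =====

-- a write at (r, c) does not change the value read at any other non-negative position
theorem pvRead_pvWrite_ne (M : List (List Int)) (r c v r' c' : Int)
    (hr : 0 ≤ r) (hc : 0 ≤ c) (hr' : 0 ≤ r') (hc' : 0 ≤ c')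
    (hne : r' ≠ r ∨ c' ≠ c) :
    pvRead (pvWrite M r c v) r' c' = pvRead M r' c' := by
  unfold pvRead pvWrite
  rw [PySem.List.pySetD_of_nonneg _ _ hr, PySem.List.pySetD_of_nonneg _ _ hc,
      PySem.List.pyGetD_of_nonneg _ _ hr, PySem.List.pyGetD_of_nonneg _ _ hr',
      PySem.List.pyGetD_of_nonneg _ _ hr', PySem.List.pyGetD_of_nonneg _ _ hc',
      PySem.List.pyGetD_of_nonneg _ _ hc']
  by_cases hrr : r.toNat = r'.toNat
  · have hcc : c.toNat ≠ c'.toNat := by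
      rcases hne with h | h
      · exact absurd (by omega : r' = r) h
      · omega
    simp only [List.getD_eq_getElem?_getD, List.getElem?_set, hrr]
    by_cases hl : r'.toNat < M.length
    · simp [hl, List.getElem?_set, hcc]
    · simp [hl]
  · simp [List.getD_eq_getElem?_getD, List.getElem?_set, hrr]

-- A's inner loop over column c adds the ORIGINAL zero count of rows y1+j (j ∈ js) of that
-- column to cnt, and changes reads only in column c
theorem innerA (img : List (List Int)) (y1 c : Int) (hc : 0 ≤ c) :
    ∀ (js : List Int), js.Nodup → (∀ j ∈ js, 0 ≤ y1 + j) →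
    ∀ (M : List (List Int)) (cnt : Int),
    (∀ j ∈ js, pvRead M (y1 + j) c = pvRead img (y1 + j) c) →
    (js.foldl
        (fun (s : List (List Int) × Int) j =>
          if pvRead s.1 (y1 + j) c == 0 then
            (pvWrite s.1 (y1 + j) c 128, s.2 + 1)
          else
            (pvWrite s.1 (y1 + j) c 200, s.2)) (M, cnt)).2
        = js.foldl (fun (cc : Int) j => if pvRead img (y1 + j) c == 0 then cc + 1 else cc) cnt
      ∧ ∀ r' c', 0 ≤ r' → 0 ≤ c' → c' ≠ c →
          pvRead ((js.foldl
            (fun (s : List (List Int) × Int) j =>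
              if pvRead s.1 (y1 + j) c == 0 then
                (pvWrite s.1 (y1 + j) c 128, s.2 + 1)
              else
                (pvWrite s.1 (y1 + j) c 200, s.2)) (M, cnt)).1) r' c' = pvRead M r' c' := by
  intro js
  induction js with
  | nil => intro _ _ M cnt _; exact ⟨rfl, fun _ _ _ _ _ => rfl⟩
  | cons j rest ih =>
    intro hnd h0 M cnt hagree
    have hj0 : 0 ≤ y1 + j := h0 j (List.mem_cons_self ..)
    have hjr : pvRead M (y1 + j) c = pvRead img (y1 + j) c :=
      hagree j (List.mem_cons_self ..)
    have hnd' : rest.Nodup := (List.nodup_cons.mp hnd).2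
    have hjnot : j ∉ rest := (List.nodup_cons.mp hnd).1
    set v : Int := if pvRead M (y1 + j) c == 0 then 128 else 200 with hv
    have step :
        (if pvRead M (y1 + j) c == 0 then
            (pvWrite M (y1 + j) c 128, cnt + 1)
          else
            (pvWrite M (y1 + j) c 200, cnt))
        = (pvWrite M (y1 + j) c v,
           if pvRead img (y1 + j) c == 0 then cnt + 1 else cnt) := by
      rw [← hjr]; by_cases h : pvRead M (y1 + j) c == 0 <;> simp [h, hv]
    have hagree' : ∀ j' ∈ rest, pvRead (pvWrite M (y1 + j) c v) (y1 + j') c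
        = pvRead img (y1 + j') c := by
      intro j' hj'
      have hne' : y1 + j' ≠ y1 + j := by
        intro h
        have hj2 : j' = j := by omega
        rw [hj2] at hj'
        exact hjnot hj'
      rw [pvRead_pvWrite_ne _ _ _ _ _ _ hj0 hc (h0 j' (List.mem_cons_of_mem _ hj')) hc
        (Or.inl hne')]
      exact hagree j' (List.mem_cons_of_mem _ hj')
    obtain ⟨ih1, ih2⟩ := ih hnd' (fun j' hj' => h0 j' (List.mem_cons_of_mem _ hj'))
      (pvWrite M (y1 + j) c v)
      (if pvRead img (y1 + j) c == 0 then cnt + 1 else cnt) hagree'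
    constructor
    · simp only [List.foldl_cons]; rw [step]; exact ih1
    · intro r' c' hr' hc' hne
      have := ih2 r' c' hr' hc' hne
      simp only [List.foldl_cons, step]
      rw [this, pvRead_pvWrite_ne _ _ _ _ _ _ hj0 hc hr' hc' (Or.inr hne)]

-- A's outer loop computes B's two-dimensional zero count of the original image
theorem outerA (img : List (List Int)) (x1 y1 : Int) (js : List Int)
    (hjn : js.Nodup) (hj0 : ∀ j ∈ js, 0 ≤ y1 + j) :
    ∀ (is : List Int), is.Nodup → (∀ i ∈ is, 0 ≤ x1 + i) →
    ∀ (M : List (List Int)) (cnt : Int),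
    (∀ i ∈ is, ∀ r', 0 ≤ r' → pvRead M r' (x1 + i) = pvRead img r' (x1 + i)) →
    (is.foldl
        (fun s i =>
          js.foldl
            (fun (s : List (List Int) × Int) j =>
              if pvRead s.1 (y1 + j) (x1 + i) == 0 then
                (pvWrite s.1 (y1 + j) (x1 + i) 128, s.2 + 1)
              else
                (pvWrite s.1 (y1 + j) (x1 + i) 200, s.2)) s) (M, cnt)).2
      = is.foldl
          (fun (cc : Int) i =>
            js.foldl
              (fun (cc : Int) j => if pvRead img (y1 + j) (x1 + i) == 0 then cc + 1 else cc) cc)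
          cnt := by
  intro is
  induction is with
  | nil => intro _ _ M cnt _; rfl
  | cons i rest ih =>
    intro hnd h0 M cnt hagree
    have hi0 : 0 ≤ x1 + i := h0 i (List.mem_cons_self ..)
    have hinot : i ∉ rest := (List.nodup_cons.mp hnd).1
    obtain ⟨in1, in2⟩ := innerA img y1 (x1 + i) hi0 js hjn hj0 M cnt
      (fun j hj => hagree i (List.mem_cons_self ..) (y1 + j) (hj0 j hj))
    simp only [List.foldl_cons]
    have hsplit :
        (js.foldl
            (fun (s : List (List Int) × Int) j =>
              if pvRead s.1 (y1 + j) (x1 + i) == 0 then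
                (pvWrite s.1 (y1 + j) (x1 + i) 128, s.2 + 1)
              else
                (pvWrite s.1 (y1 + j) (x1 + i) 200, s.2)) (M, cnt))
        = ((js.foldl
            (fun (s : List (List Int) × Int) j =>
              if pvRead s.1 (y1 + j) (x1 + i) == 0 then
                (pvWrite s.1 (y1 + j) (x1 + i) 128, s.2 + 1)
              else
                (pvWrite s.1 (y1 + j) (x1 + i) 200, s.2)) (M, cnt)).1,
           js.foldl
              (fun (cc : Int) j => if pvRead img (y1 + j) (x1 + i) == 0 then cc + 1 else cc) cnt) := by
      rw [← in1]
    rw [hsplit]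
    apply ih (List.nodup_cons.mp hnd).2 (fun i' hi' => h0 i' (List.mem_cons_of_mem _ hi'))
    intro i' hi' r' hr'
    have hii : x1 + i' ≠ x1 + i := by
      intro h
      have : i' = i := by omega
      rw [this] at hi'
      exact hinot hi'
    rw [in2 r' (x1 + i') hr' (h0 i' (List.mem_cons_of_mem _ hi')) hii]
    exact hagree i' (List.mem_cons_of_mem _ hi') r' hr'

theorem foldl_id {α β : Type} (l : List β) (a : α) : l.foldl (fun s _ => s) a = a := by
  induction l generalizing a with
  | nil => rfl
  | cons x xs ih => simpa using ih a

-- ===== VERDICT (by name: the statement is the Claim_ definition above) =====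
theorem if_exist_spec : Claim_equal_if_exist := by
  intro img x1 y1 x2 y2 _hdom hpre
  unfold Spec_if_exist
  simp only [if_exist, if_exist_alt]
  by_cases hx : x1 < x2
  · by_cases hy : y1 < y2
    · obtain ⟨hx0, hy0, -, -⟩ := hpre ⟨hx, hy⟩
      rw [outerA img x1 y1 (PySem.List.pyRange 0 (y2 - y1) 1) (PySem.List.nodup_pyRange_one _ _)
        (fun j hj => by have := (PySem.List.mem_pyRange_one.mp hj).1; omega)
        (PySem.List.pyRange 0 (x2 - x1) 1) (PySem.List.nodup_pyRange_one _ _)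
        (fun i hi => by have := (PySem.List.mem_pyRange_one.mp hi).1; omega)
        img 0 (fun _ _ _ _ => rfl)]
      by_cases h : (PySem.List.pyRange 0 (x2 - x1) 1).foldl
          (fun (cc : Int) i =>
            (PySem.List.pyRange 0 (y2 - y1) 1).foldl
              (fun (cc : Int) j => if pvRead img (y1 + j) (x1 + i) == 0 then cc + 1 else cc) cc)
          0 > 6 <;> simp [h]
    · rw [PySem.List.pyRange_one_eq_nil (show (y2 - y1 : Int) ≤ 0 by omega)]
      simp only [List.foldl_nil, foldl_id]
      simp
  · rw [PySem.List.pyRange_one_eq_nil (show (x2 - x1 : Int) ≤ 0 by omega)]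
    simp only [List.foldl_nil]
    simp
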